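-- pv_equiv track=rewrite | github.com/tsuru7/algorithm-study | AtCoder/ABC239/C.py | solve
-- ===== SOURCE A (Python) =====
-- def solve(x1, y1, x2, y2):
--     set1 = set()
--     set2 = set()
--     for dx, dy in [(1, 2), (2, 1), (2, -1), (1, -2), (-1, -2), (-2, -1), (-2, 1), (-1, 2)]:
--         set1.add((x1+dx, y1+dy))
--         set2.add((x2+dx, y2+dy))
--     if len(set1 & set2) != 0:
--         return 'Yes'
--     else:
--         return 'No'
-- ===== SOURCE B (Python) =====
-- MOVES = [(1, 2), (2, 1), (2, -1), (1, -2), (-1, -2), (-2, -1), (-2, 1), (-1, 2)]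
-- # Every relative displacement x2-x1, y2-y1 from which the two knights share a reachable square.
-- DIFFS = {(a[0] - b[0], a[1] - b[1]) for a in MOVES for b in MOVES}
--
--
-- def solve(x1, y1, x2, y2):
--     return 'Yes' if (x2 - x1, y2 - y1) in DIFFS else 'No'
-- ===== Notes on version B (the rewrite author's own statement) =====
-- stated objective: simpler
-- what changed: B replaces A's per-call construction of two 8-element coordinate sets and their intersection with a single membership test of the relative displacement (x2-x1, y2-y1) in a constant table DIFFS of all knight-move differences, built once at module load.
import Mathlib
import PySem

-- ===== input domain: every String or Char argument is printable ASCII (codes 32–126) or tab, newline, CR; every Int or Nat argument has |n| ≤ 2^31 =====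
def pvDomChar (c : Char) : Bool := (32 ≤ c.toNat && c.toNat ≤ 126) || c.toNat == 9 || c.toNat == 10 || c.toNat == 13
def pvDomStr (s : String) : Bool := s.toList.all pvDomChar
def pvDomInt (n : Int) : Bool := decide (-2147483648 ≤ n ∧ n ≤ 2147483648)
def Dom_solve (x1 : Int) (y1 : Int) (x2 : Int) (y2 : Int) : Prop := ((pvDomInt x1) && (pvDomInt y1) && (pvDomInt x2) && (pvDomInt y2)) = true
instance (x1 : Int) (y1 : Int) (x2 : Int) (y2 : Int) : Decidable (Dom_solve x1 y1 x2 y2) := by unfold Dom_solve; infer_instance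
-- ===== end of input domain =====

-- B replaces A's per-call set construction and intersection by one lookup of the relative
-- displacement in a constant table of knight-move differences (simpler; same asymptotic cost).


-- ===== PORT A =====
def knightMoves : List (Int × Int) :=
  [(1, 2), (2, 1), (2, -1), (1, -2), (-1, -2), (-2, -1), (-2, 1), (-1, 2)]

def solve (x1 : Int) (y1 : Int) (x2 : Int) (y2 : Int) : String :=
  let sets := knightMoves.foldl
    (fun (p : PySem.Set (Int × Int) × PySem.Set (Int × Int)) m =>
      (PySem.Set.add p.1 (x1 + m.1, y1 + m.2), PySem.Set.add p.2 (x2 + m.1, y2 + m.2)))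
    (PySem.Set.empty, PySem.Set.empty)
  if PySem.Set.len (PySem.Set.inter sets.1 sets.2) ≠ 0 then "Yes" else "No"

-- ===== PORT B =====
-- constant table: every difference m1 - m2 of two knight moves
def knightDiffs : PySem.Set (Int × Int) :=
  PySem.Set.ofList (knightMoves.flatMap fun a => knightMoves.map fun b => (a.1 - b.1, a.2 - b.2))

def solve_alt (x1 : Int) (y1 : Int) (x2 : Int) (y2 : Int) : String :=
  if PySem.Set.contains knightDiffs (x2 - x1, y2 - y1) then "Yes" else "No"

-- ===== PRECONDITION & SPEC =====
def Spec_solve (x1 : Int) (y1 : Int) (x2 : Int) (y2 : Int) (out : String) : Prop := out = solve_alt x1 y1 x2 y2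
instance (x1 : Int) (y1 : Int) (x2 : Int) (y2 : Int) (out : String) : Decidable (Spec_solve x1 y1 x2 y2 out) := by unfold Spec_solve; infer_instance

-- ===== CLAIM (what is proved, stated in full; the proofs are below) =====
def Claim_equal_solve : Prop := ∀ (x1 : Int) (y1 : Int) (x2 : Int) (y2 : Int), Dom_solve x1 y1 x2 y2 → Spec_solve x1 y1 x2 y2 (solve x1 y1 x2 y2)

-- ===== LEMMAS AND PROOFS =====
lemma cond_iff (x1 y1 x2 y2 : Int) :
    (PySem.Set.len (PySem.Set.inter
        (knightMoves.foldl (fun s m => PySem.Set.add s (x1 + m.1, y1 + m.2)) PySem.Set.empty)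
        (knightMoves.foldl (fun s m => PySem.Set.add s (x2 + m.1, y2 + m.2)) PySem.Set.empty)) ≠ 0)
    ↔ PySem.Set.contains knightDiffs (x2 - x1, y2 - y1) = true := by
  rw [PySem.Set.contains_iff]
  unfold knightDiffs
  rw [PySem.Set.mem_ofList]
  simp only [PySem.Set.len, ne_eq, Int.natCast_eq_zero, List.length_eq_zero_iff,
    List.eq_nil_iff_forall_not_mem, not_forall, not_not]
  constructor
  · rintro ⟨y, hy⟩
    rw [PySem.Set.mem_inter, PySem.Set.mem_foldl_add, PySem.Set.mem_foldl_add] at hy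
    simp only [List.mem_flatMap, List.mem_map]
    obtain ⟨h1, h2⟩ := hy
    rcases h1 with h1 | ⟨m1, hm1, rfl⟩
    · exact absurd h1 (List.not_mem_nil)
    rcases h2 with h2 | ⟨m2, hm2, he⟩
    · exact absurd h2 (List.not_mem_nil)
    refine ⟨m1, hm1, m2, hm2, ?_⟩
    have h1 := congrArg Prod.fst he
    have h2 := congrArg Prod.snd he
    simp at h1 h2 ⊢
    omega
  · rintro h
    simp only [List.mem_flatMap, List.mem_map] at h
    obtain ⟨m1, hm1, m2, hm2, he⟩ := h
    refine ⟨(x1 + m1.1, y1 + m1.2), ?_⟩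
    rw [PySem.Set.mem_inter, PySem.Set.mem_foldl_add, PySem.Set.mem_foldl_add]
    have h1 := congrArg Prod.fst he
    have h2 := congrArg Prod.snd he
    simp at h1 h2
    refine ⟨Or.inr ⟨m1, hm1, rfl⟩, Or.inr ⟨m2, hm2, ?_⟩⟩
    simp
    omega

-- ===== VERDICT (by name: the statement is the Claim_ definition above) =====
set_option maxHeartbeats 1000000 in
theorem solve_spec : Claim_equal_solve := by
  intro x1 y1 x2 y2 _
  unfold Spec_solve solve solve_alt
  dsimp only []
  rw [PySem.List.foldl_prod_mk (fun (s : PySem.Set (Int × Int)) m => PySem.Set.add s (x1 + m.1, y1 + m.2))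
      (fun (s : PySem.Set (Int × Int)) m => PySem.Set.add s (x2 + m.1, y2 + m.2)) knightMoves
      PySem.Set.empty PySem.Set.empty]
  exact if_congr (cond_iff x1 y1 x2 y2) rfl rfl
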